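-- pv_equiv track=rewrite | github.com/gdu199/repo_python | Lesson_4/task_5.py | my_cycle
-- ===== SOURCE A (Python) =====
-- from itertools import cycle
--
-- def my_cycle(n):
--     i = 0
--     for el in cycle(('ААА', 'ООО', 'ЕЕЕ')):
--         if i >= n:
--             break
--         else:
--             yield el
--             i += 1
-- ===== SOURCE B (Python) =====
-- def my_cycle(n):
--     parts = ('ААА', 'ООО', 'ЕЕЕ')
--     total = max(n, 0)
--     q, r = divmod(total, 3)
--     yield from parts * q
--     yield from parts[:r]
-- ===== Notes on version B (the rewrite author's own statement) =====
-- stated objective: alternative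
-- what changed: Replaces the per-element itertools.cycle loop with a counter by a closed-form divmod(n,3) bulk construction: emit q whole copies of the tuple via sequence repetition, then a prefix slice of r leftover elements, with no per-item loop or counter.
import Mathlib
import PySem

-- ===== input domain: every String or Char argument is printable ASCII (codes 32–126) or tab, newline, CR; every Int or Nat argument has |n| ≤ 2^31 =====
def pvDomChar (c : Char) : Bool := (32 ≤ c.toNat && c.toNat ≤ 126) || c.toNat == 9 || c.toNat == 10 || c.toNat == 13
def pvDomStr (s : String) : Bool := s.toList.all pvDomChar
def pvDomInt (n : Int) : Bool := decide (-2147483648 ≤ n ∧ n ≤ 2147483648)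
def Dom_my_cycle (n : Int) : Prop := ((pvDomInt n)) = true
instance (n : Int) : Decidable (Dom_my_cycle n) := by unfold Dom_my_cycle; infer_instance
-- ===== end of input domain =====

-- B replaces A's per-element cycle-iterator loop by a closed-form divmod(n,3) bulk construction
-- (q whole copies of the tuple, then a prefix slice of r leftovers); same values, same order.

-- ===== PORT A =====
-- itertools.cycle is modelled as the rotating list: take the head, move it to the back;
-- the loop body runs exactly n.toNat times (i counts up from 0 until i ≥ n).
def myCycleLoop : Nat → List String → List String
  | 0, _ => []
  | _ + 1, [] => []
  | m + 1, c :: rest => c :: myCycleLoop m (rest ++ [c])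

def my_cycle (n : Int) : List String :=
  myCycleLoop n.toNat ["ААА", "ООО", "ЕЕЕ"]

-- ===== PORT B =====
-- total = max(n, 0); q, r = divmod(total, 3); parts * q  ++  parts[:r]
def my_cycle_alt (n : Int) : List String :=
  let parts : List String := ["ААА", "ООО", "ЕЕЕ"]
  let total := max n 0
  let q := PySem.Int.floordiv total 3
  let r := PySem.Int.mod total 3
  List.flatten (List.replicate q.toNat parts) ++ PySem.List.slice parts none (some r)

-- ===== PRECONDITION & SPEC =====
def Spec_my_cycle (n : Int) (out : List String) : Prop := out = my_cycle_alt n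
instance (n : Int) (out : List String) : Decidable (Spec_my_cycle n out) := by unfold Spec_my_cycle; infer_instance

-- ===== CLAIM =====
def Claim_equal_my_cycle : Prop := ∀ (n : Int), Dom_my_cycle n → Spec_my_cycle n (my_cycle n)

-- ===== LEMMAS AND PROOFS =====

-- after three steps, the cycle is back at the canonical rotation
theorem pvLoop_rot3 (k : Nat) :
    myCycleLoop (k + 3) ["ААА", "ООО", "ЕЕЕ"]
      = "ААА" :: "ООО" :: "ЕЕЕ" :: myCycleLoop k ["ААА", "ООО", "ЕЕЕ"] := by
  simp [show k + 3 = ((k + 1) + 1) + 1 from rfl, myCycleLoop]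

-- A's loop of 3*q + r steps = q whole blocks followed by the first r elements
theorem pvLoop_closed (q : Nat) : ∀ r : Nat, r < 3 →
    myCycleLoop (3 * q + r) ["ААА", "ООО", "ЕЕЕ"]
      = List.flatten (List.replicate q ["ААА", "ООО", "ЕЕЕ"])
        ++ (["ААА", "ООО", "ЕЕЕ"] : List String).take r := by
  induction q with
  | zero =>
    intro r hr
    interval_cases r <;> simp [myCycleLoop]
  | succ q ih =>
    intro r hr
    have h : 3 * (q + 1) + r = (3 * q + r) + 3 := by ring
    rw [h, pvLoop_rot3, ih r hr]
    simp [List.replicate_succ]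

-- ===== VERDICT =====
theorem my_cycle_spec : Claim_equal_my_cycle := by
  intro n _
  unfold Spec_my_cycle my_cycle my_cycle_alt
  dsimp only
  by_cases h : n ≤ 0
  · have ht : max n 0 = 0 := by omega
    have hn : n.toNat = 0 := by omega
    simp [ht, hn, myCycleLoop, PySem.Int.floordiv, PySem.Int.mod, PySem.List.slice]
  · have ht : max n 0 = n := by omega
    rw [ht]
    have hq : PySem.Int.floordiv n 3 = n / 3 :=
      PySem.Int.floordiv_eq_ediv_of_pos (by omega)
    have hr : PySem.Int.mod n 3 = n % 3 :=
      PySem.Int.mod_eq_emod_of_pos (by omega)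
    rw [hq, hr, PySem.List.slice_to _ (show (0:Int) ≤ n % 3 by omega)]
    have hsplit : n.toNat = 3 * (n / 3).toNat + (n % 3).toNat := by omega
    have hrlt : (n % 3).toNat < 3 := by omega
    rw [hsplit]
    exact pvLoop_closed (n / 3).toNat (n % 3).toNat hrlt
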